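-- pv_equiv track=rewrite | github.com/VitusPuttmann/advent-code-2024 | src/advent_code_2024/day_09.py | identify_last_element
-- ===== SOURCE A (Python) =====
-- def identify_last_element(filemap: list[str]) -> tuple:
--     """ Take a list of strings (i.e. filemap) and return the content and index
--         of the last string that is not a '.' (i.e. file number). """
--
--     reversed_filemap = list(reversed(filemap))
--
--     file_content = next(item for item in reversed_filemap if item != '.')
--     file_index = (
--         len(reversed_filemap) - 1
--     ) - reversed_filemap.index(file_content)
--
--     file_information = (file_content, file_index)
--
--     return file_information
-- ===== SOURCE B (Python) =====
-- def identify_last_element(filemap: list[str]) -> tuple: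
--     """ Return the content and index of the last string that is not '.'. """
--     return next((filemap[i], i) for i in range(len(filemap) - 1, -1, -1)
--                 if filemap[i] != '.')
-- ===== Notes on version B (the rewrite author's own statement) =====
-- stated objective: simpler
-- what changed: B replaces A's reverse-copy + value-based .index recovery with a single backward index scan that yields the value and index together.
import Mathlib
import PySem

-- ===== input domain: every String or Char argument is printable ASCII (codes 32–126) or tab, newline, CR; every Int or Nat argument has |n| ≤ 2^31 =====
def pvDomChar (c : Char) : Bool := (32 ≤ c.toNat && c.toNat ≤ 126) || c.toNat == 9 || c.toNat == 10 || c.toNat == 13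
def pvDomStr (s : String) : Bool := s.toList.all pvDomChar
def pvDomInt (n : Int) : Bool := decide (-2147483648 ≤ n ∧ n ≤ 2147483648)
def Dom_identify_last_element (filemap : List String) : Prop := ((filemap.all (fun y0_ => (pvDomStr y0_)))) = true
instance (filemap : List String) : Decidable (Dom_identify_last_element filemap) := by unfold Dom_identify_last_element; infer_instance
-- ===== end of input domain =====

-- B is simpler: one backward index scan yielding value and index together, instead of
-- reversing the list and recovering the index by a value-based .index search.
-- Return-value equivalence on Pre_ (some element ≠ "."); both Pythons raise StopIteration otherwise.

-- ===== PORT A =====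
-- A: reverse the list, take the first item ≠ ".", recover its index by value search.
def identify_last_element (filemap : List String) : String × Int :=
  let reversed_filemap := filemap.reverse
  match reversed_filemap.find? (fun item => item != ".") with
  | none => ("", 0)   -- StopIteration in Python; excluded by Pre_
  | some file_content =>
      let file_index : Int :=
        ((reversed_filemap.length : Int) - 1) -
          ((PySem.List.index? reversed_filemap file_content).getD 0 : Nat)
      (file_content, file_index)

-- ===== PORT B =====
-- B: scan indices len-1, len-2, …, 0; first i with filemap[i] ≠ "." yields (filemap[i], i).
def pvScanBack (filemap : List String) : Nat → String × Int
  | 0 => ("", 0)      -- StopIteration in Python; excluded by Pre_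
  | Nat.succ i =>
      let s := filemap.getD i ""
      if s != "." then (s, (i : Int)) else pvScanBack filemap i

def identify_last_element_alt (filemap : List String) : String × Int :=
  pvScanBack filemap filemap.length

-- ===== PRECONDITION & SPEC =====
-- Pre_ excludes inputs with no non-"." element, on which both Pythons raise StopIteration.
def Pre_identify_last_element (filemap : List String) : Prop :=
  ∃ s ∈ filemap, s ≠ "."
instance (filemap : List String) : Decidable (Pre_identify_last_element filemap) := by
  unfold Pre_identify_last_element; infer_instance

def pvWitness_identify_last_element : List String := [".", "0", "."]

def Spec_identify_last_element (filemap : List String) (out : String × Int) : Prop := out = identify_last_element_alt filemap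
instance (filemap : List String) (out : String × Int) : Decidable (Spec_identify_last_element filemap out) := by unfold Spec_identify_last_element; infer_instance

-- ===== CLAIM (what is proved, stated in full; the proofs are below) =====
def Claim_equal_identify_last_element : Prop := ∀ (filemap : List String), Dom_identify_last_element filemap → Pre_identify_last_element filemap → Spec_identify_last_element filemap (identify_last_element filemap)

-- ===== LEMMAS AND PROOFS =====

-- pvScanBack only inspects indices < n, so appending past n is invisible.
lemma pvScanBack_append (fm : List String) (t : List String) (n : Nat) (hn : n ≤ fm.length) :
    pvScanBack (fm ++ t) n = pvScanBack fm n := by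
  induction n with
  | zero => rfl
  | succ i ih =>
      have hi : i < fm.length := hn
      simp only [pvScanBack, List.getD_append _ _ _ _ hi, ih (Nat.le_of_lt hi)]

lemma pvScanBack_snoc (fm : List String) (x : String) :
    pvScanBack (fm ++ [x]) (fm.length + 1) =
      if x != "." then (x, (fm.length : Int)) else pvScanBack fm fm.length := by
  simp only [pvScanBack, List.getD_append_right _ _ _ _ (Nat.le_refl _), Nat.sub_self]
  by_cases h : x != "."
  · simp [h]
  · simp [h, pvScanBack_append fm [x] fm.length (Nat.le_refl _)]

theorem pv_main (filemap : List String) (h : Pre_identify_last_element filemap) :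
    identify_last_element filemap = identify_last_element_alt filemap := by
  induction filemap using List.reverseRecOn with
  | nil => rcases h with ⟨s, hs, _⟩; simp at hs
  | append_singleton fm x ih =>
      unfold identify_last_element identify_last_element_alt
      rw [List.reverse_append, List.reverse_singleton, List.singleton_append,
        List.length_append, List.length_singleton, pvScanBack_snoc]
      by_cases hx : x = "."
      · -- x is "."; the last non-"." element lies in fm
        subst hx
        have hpre : Pre_identify_last_element fm := by
          rcases h with ⟨s, hs, hne⟩
          rcases List.mem_append.mp hs with h1 | h1
          · exact ⟨s, h1, hne⟩
          · simp at h1; exact absurd h1 hne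
        have := ih hpre
        unfold identify_last_element identify_last_element_alt at this
        rcases hfind : fm.reverse.find? (fun item => item != ".") with _ | c
        · -- contradiction: Pre_ fm guarantees a hit
          rcases hpre with ⟨s, hs, hne⟩
          have := List.find?_eq_none.mp hfind s (by simp [hs])
          simp [hne] at this
        · have hc : c ≠ "." := by
            have := List.find?_some hfind
            simpa using this
          simp only [List.find?, hfind] at this ⊢
          simp only [show (("." : String) != ".") = false from by simp, Bool.false_eq_true,
            if_false]
          rw [PySem.List.index?_cons_of_ne _ (Ne.symm hc)]
          have hmem : c ∈ fm.reverse := List.mem_of_find?_eq_some hfind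
          rcases (PySem.List.index?_isSome_iff fm.reverse c).mpr hmem |> Option.isSome_iff_exists.mp
            with ⟨k, hk⟩
          rw [hk]
          rw [hk] at this
          simp only [Option.map_some, Option.getD_some] at this ⊢
          rw [← this]
          simp [List.length_reverse]
          ring
      · -- x ≠ ".": the scan and the find both stop at x immediately
        have hx' : (x != ".") = true := by simpa using hx
        simp only [List.find?, hx', if_true]
        rw [PySem.List.index?_cons_self]
        simp [List.length_reverse]

-- ===== VERDICT (by name: the statement is the Claim_ definition above) =====
theorem identify_last_element_spec : Claim_equal_identify_last_element := by
  intro fm _ hpre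
  unfold Spec_identify_last_element
  exact pv_main fm hpre
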